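-- pv_equiv track=rewrite | github.com/rishikr507/python-client-server-infix-postfix-prefix-converter- | client.py | is_valid_prefix
-- ===== SOURCE A (Python) =====
-- def is_valid_prefix(expression):
--     tokens = expression.split(' ')
--     stack = []
--
--     for token in reversed(tokens):
--         if token.isalnum():  # Operand
--             stack.append(token)
--         elif token in '+-*/':  # Operator
--             if len(stack) < 2:
--                 return False
--             operand1 = stack.pop()
--             operand2 = stack.pop()
--             stack.append('result')  # Placeholder for result
--         else:
--             return False
--
--     return len(stack) == 1
-- ===== SOURCE B (Python) =====
-- def is_valid_prefix(expression):
--     # Recursive-descent parser: parse one prefix expression off the front of the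
--     # token list, returning the leftover tokens (or None); valid iff nothing is left.
--     def parse(toks):
--         if not toks:
--             return None
--         t, rest = toks[0], toks[1:]
--         if t.isalnum():
--             return rest
--         if t in '+-*/':
--             mid = parse(rest)
--             return parse(mid) if mid is not None else None
--         return None
--     return parse(expression.split(' ')) == []
-- ===== Notes on version B (the rewrite author's own statement) =====
-- stated objective: alternative
-- what changed: Replaces the right-to-left scan with an explicit operand stack by a top-down recursive-descent parser that consumes one prefix expression off the front of the token list and checks that nothing remains.
import Mathlib
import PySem

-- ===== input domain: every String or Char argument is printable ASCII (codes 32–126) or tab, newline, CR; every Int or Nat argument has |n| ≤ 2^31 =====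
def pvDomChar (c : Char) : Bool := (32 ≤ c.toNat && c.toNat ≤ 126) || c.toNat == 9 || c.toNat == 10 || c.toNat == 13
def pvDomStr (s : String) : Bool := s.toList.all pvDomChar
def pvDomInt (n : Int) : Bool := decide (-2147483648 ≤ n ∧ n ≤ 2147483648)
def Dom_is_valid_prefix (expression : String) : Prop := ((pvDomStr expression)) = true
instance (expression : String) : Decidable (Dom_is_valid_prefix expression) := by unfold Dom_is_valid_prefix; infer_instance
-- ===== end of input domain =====

-- B replaces A's reversed scan with an operand stack by a top-down
-- recursive-descent parser over the forward token list; same return value.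

-- ===== PORT A =====
-- A's loop over reversed(tokens), carrying the stack (Python appends/pops at the
-- end of the list; here the top of the stack is the head, so append = cons and
-- pop;pop;append('result') = drop 2 then cons).
def pvALoop (stack : List String) (toks : List String) : Bool :=
  match toks with
  | [] => stack.length == 1
  | t :: ts =>
    if PySem.Str.strIsalnum t then pvALoop (t :: stack) ts
    else if PySem.Str.isIn t "+-*/" then
      if stack.length < 2 then false
      else pvALoop ("result" :: stack.drop 2) ts
    else false

def is_valid_prefix (expression : String) : Bool :=
  pvALoop [] ((PySem.Str.split? expression " ").getD []).reverse

-- ===== PORT B =====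
-- B's recursive parse(toks): consume one prefix expression, return the leftover
-- tokens (none = parse failure).  The fuel argument is only a totality device:
-- fuel = toks.length always suffices, since every recursive call is on a
-- strictly shorter list.
def pvParse (fuel : Nat) (toks : List String) : Option (List String) :=
  match fuel, toks with
  | 0, _ => none
  | _, [] => none
  | fuel + 1, t :: rest =>
    if PySem.Str.strIsalnum t then some rest
    else if PySem.Str.isIn t "+-*/" then
      match pvParse fuel rest with
      | some mid => pvParse fuel mid
      | none => none
    else none

def is_valid_prefix_alt (expression : String) : Bool :=
  let toks := (PySem.Str.split? expression " ").getD []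
  decide (pvParse toks.length toks = some [])

-- ===== PRECONDITION & SPEC =====
def Spec_is_valid_prefix (expression : String) (out : Bool) : Prop := out = is_valid_prefix_alt expression
instance (expression : String) (out : Bool) : Decidable (Spec_is_valid_prefix expression out) := by unfold Spec_is_valid_prefix; infer_instance

-- ===== CLAIM (what is proved, stated in full; the proofs are below) =====
def Claim_equal_is_valid_prefix : Prop := ∀ (expression : String), Dom_is_valid_prefix expression → Spec_is_valid_prefix expression (is_valid_prefix expression)

-- ===== LEMMAS AND PROOFS =====

-- Option-valued state-threading version of A's loop (none = early False),
-- carrying only the stack LENGTH (the stack contents never matter).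
def pvRunA (k : Nat) (toks : List String) : Option Nat :=
  match toks with
  | [] => some k
  | t :: ts =>
    if PySem.Str.strIsalnum t then pvRunA (k + 1) ts
    else if PySem.Str.isIn t "+-*/" then
      if k < 2 then none else pvRunA (k - 1) ts
    else none

-- Right-fold (structural on the un-reversed token list) form of A's scan.
def pvRunAR (toks : List String) : Option Nat :=
  match toks with
  | [] => some 0
  | t :: ts =>
    match pvRunAR ts with
    | none => none
    | some k =>
      if PySem.Str.strIsalnum t then some (k + 1)
      else if PySem.Str.isIn t "+-*/" then
        if k < 2 then none else some (k - 1)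
      else none

-- pvCat n toks: toks is a concatenation of exactly n valid prefix expressions.
-- pvCat 1 toks = "toks is one valid prefix expression".
inductive pvCat : Nat → List String → Prop where
  | nil : pvCat 0 []
  | operand (t : String) (n : Nat) (ts : List String)
      (h : PySem.Chars.strIsalnum t.toList = true)
      (hc : pvCat n ts) : pvCat (n + 1) (t :: ts)
  | oper (t : String) (n : Nat) (ts : List String)
      (h1 : PySem.Chars.strIsalnum t.toList = false)
      (h2 : PySem.Chars.isIn t.toList ['+', '-', '*', '/'] = true)
      (hc : pvCat (n + 2) ts) : pvCat (n + 1) (t :: ts)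

theorem pvCat_nil_inv {n : Nat} (h : pvCat n []) : n = 0 := by
  cases h; rfl

theorem pvCat_cons_inv {n : Nat} {t : String} {ts : List String}
    (h : pvCat n (t :: ts)) :
    1 ≤ n ∧ ((PySem.Chars.strIsalnum t.toList = true ∧ pvCat (n - 1) ts) ∨
      (PySem.Chars.strIsalnum t.toList = false ∧
        PySem.Chars.isIn t.toList ['+', '-', '*', '/'] = true ∧ pvCat (n + 1) ts)) := by
  cases h with
  | operand _ m _ ha hc =>
    exact ⟨by omega, Or.inl ⟨ha, by simpa using hc⟩⟩
  | oper _ m _ h1 h2 hc =>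
    exact ⟨by omega, Or.inr ⟨h1, h2, by simpa [Nat.add_assoc] using hc⟩⟩

theorem pvCat_one_singleton {t : String}
    (h : PySem.Chars.strIsalnum t.toList = true) : pvCat 1 [t] :=
  pvCat.operand t 0 [] h pvCat.nil

theorem pvCat_not_one_nil : ¬ pvCat 1 [] := by
  intro h; have := pvCat_nil_inv h; omega

theorem pvCat_zero_nil {xs : List String} (h : pvCat 0 xs) : xs = [] := by
  cases xs with
  | nil => rfl
  | cons t ts => have := (pvCat_cons_inv h).1; omega

-- Concatenation: m expressions followed by n expressions.
theorem pvCat_append {n : Nat} {ys : List String} (hy : pvCat n ys) :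
    ∀ {m : Nat} {xs : List String}, pvCat m xs → pvCat (m + n) (xs ++ ys) := by
  intro m xs hx
  induction hx with
  | nil => simpa using hy
  | operand t m' ts h hc ih =>
    have := pvCat.operand t (m' + n) (ts ++ ys) h ih
    have he : m' + n + 1 = m' + 1 + n := by omega
    rw [he] at this; exact this
  | oper t m' ts h1 h2 hc ih =>
    have ih' : pvCat (m' + n + 2) (ts ++ ys) := by
      have he : m' + n + 2 = m' + 2 + n := by omega
      rw [he]; exact ih
    have := pvCat.oper t (m' + n) (ts ++ ys) h1 h2 ih'
    have he : m' + n + 1 = m' + 1 + n := by omega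
    rw [he] at this; exact this

-- Splitting off the first complete expression.
theorem pvCat_split (N : Nat) : ∀ (xs : List String), xs.length ≤ N → ∀ n : Nat,
    pvCat n xs → 1 ≤ n →
    ∃ p1 p2, xs = p1 ++ p2 ∧ pvCat 1 p1 ∧ pvCat (n - 1) p2 := by
  induction N with
  | zero =>
    intro xs hlen n h h1
    have hx : xs = [] := by cases xs with
      | nil => rfl
      | cons t ts => simp at hlen
    subst hx
    have := pvCat_nil_inv h; omega
  | succ N ih =>
    intro xs hlen n h h1
    cases xs with
    | nil => have := pvCat_nil_inv h; omega
    | cons t ts =>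
      rcases (pvCat_cons_inv h).2 with ⟨ha, hc⟩ | ⟨ha, hop, hc⟩
      · exact ⟨[t], ts, rfl, pvCat_one_singleton ha, hc⟩
      · have hts : ts.length ≤ N := by simp at hlen; omega
        obtain ⟨q1, q2, hq, hq1, hq2⟩ := ih ts hts (n + 1) hc (by omega)
        have hq2' : pvCat n q2 := by simpa using hq2
        have hq2len : q2.length ≤ N := by
          have : q1.length + q2.length = ts.length := by
            rw [hq] at hts ⊢; simp
          omega
        obtain ⟨r1, r2, hr, hr1, hr2⟩ := ih q2 hq2len n hq2' h1
        refine ⟨t :: (q1 ++ r1), r2, ?_, ?_, hr2⟩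
        · rw [hq, hr]; simp
        · have h2 : pvCat 2 (q1 ++ r1) := pvCat_append hr1 hq1
          exact pvCat.oper t 0 (q1 ++ r1) ha hop h2

-- The recursive-descent parser computes exactly "strip one expression".
theorem pvParse_iff : ∀ (fuel : Nat) (toks : List String), toks.length ≤ fuel →
    ∀ rest : List String,
    (pvParse fuel toks = some rest ↔ ∃ pre, toks = pre ++ rest ∧ pvCat 1 pre) := by
  intro fuel
  induction fuel with
  | zero =>
    intro toks hlen rest
    have hx : toks = [] := by cases toks with
      | nil => rfl
      | cons t ts => simp at hlen
    subst hx
    simp only [pvParse]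
    constructor
    · intro h; simp at h
    · rintro ⟨pre, hp, hc⟩
      have : pre = [] := by
        cases pre with
        | nil => rfl
        | cons a as => simp at hp
      rw [this] at hc; exact absurd hc pvCat_not_one_nil
  | succ k ih =>
    intro toks hlen rest
    cases toks with
    | nil =>
      simp only [pvParse]
      constructor
      · intro h; simp at h
      · rintro ⟨pre, hp, hc⟩
        have : pre = [] := by
          cases pre with
          | nil => rfl
          | cons a as => simp at hp
        rw [this] at hc; exact absurd hc pvCat_not_one_nil
    | cons t ts =>
      have hts : ts.length ≤ k := by simp at hlen; omega
      by_cases h1 : PySem.Chars.strIsalnum t.toList = true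
      · have hred : pvParse (k + 1) (t :: ts) = some ts := by
          simp [pvParse, h1]
        rw [hred]
        constructor
        · intro h
          have : rest = ts := by simpa using h.symm
          subst this
          exact ⟨[t], rfl, pvCat_one_singleton h1⟩
        · rintro ⟨pre, hp, hc⟩
          cases pre with
          | nil => exact absurd hc pvCat_not_one_nil
          | cons p ps =>
            obtain ⟨rfl, hts'⟩ : t = p ∧ ts = ps ++ rest := by simpa using hp
            rcases (pvCat_cons_inv hc).2 with ⟨_, hc'⟩ | ⟨ha, _, _⟩
            · have hps : ps = [] := pvCat_zero_nil (by simpa using hc')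
              rw [hps] at hts'
              simp [hts']
            · rw [h1] at ha; exact absurd ha (by simp)
      · have h1' : PySem.Chars.strIsalnum t.toList = false := by simpa using h1
        by_cases h2 : PySem.Chars.isIn t.toList ['+', '-', '*', '/'] = true
        · have hred : pvParse (k + 1) (t :: ts) =
              match pvParse k ts with
              | some mid => pvParse k mid
              | none => none := by
            simp [pvParse, h1', h2]
          rw [hred]
          constructor
          · intro h
            cases hmid : pvParse k ts with
            | none => rw [hmid] at h; simp at h
            | some mid =>
              rw [hmid] at h
              obtain ⟨pre1, hp1, hc1⟩ := (ih ts hts mid).mp hmid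
              have hmidlen : mid.length ≤ k := by
                rw [hp1] at hts; simp at hts; omega
              obtain ⟨pre2, hp2, hc2⟩ := (ih mid hmidlen rest).mp h
              refine ⟨t :: (pre1 ++ pre2), ?_, ?_⟩
              · rw [hp1, hp2]; simp
              · have hcc : pvCat 2 (pre1 ++ pre2) := pvCat_append hc2 hc1
                exact pvCat.oper t 0 (pre1 ++ pre2) h1' h2 hcc
          · rintro ⟨pre, hp, hc⟩
            cases pre with
            | nil => exact absurd hc pvCat_not_one_nil
            | cons p ps =>
              obtain ⟨rfl, hts'⟩ : t = p ∧ ts = ps ++ rest := by simpa using hp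
              rcases (pvCat_cons_inv hc).2 with ⟨ha, _⟩ | ⟨_, _, hc'⟩
              · rw [h1'] at ha; exact absurd ha (by simp)
              · have hc2 : pvCat 2 ps := by simpa using hc'
                obtain ⟨q1, q2, hq, hq1, hq2⟩ :=
                  pvCat_split ps.length ps le_rfl 2 hc2 (by omega)
                have hq2' : pvCat 1 q2 := by simpa using hq2
                have hts2 : ts = q1 ++ (q2 ++ rest) := by rw [hts', hq]; simp
                have hstep1 : pvParse k ts = some (q2 ++ rest) :=
                  (ih ts hts (q2 ++ rest)).mpr ⟨q1, hts2, hq1⟩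
                have hlen2 : (q2 ++ rest).length ≤ k := by
                  have hq1ne : q1 ≠ [] := by
                    intro he; rw [he] at hq1; exact pvCat_not_one_nil hq1
                  rw [hts2] at hts
                  cases q1 with
                  | nil => exact absurd rfl hq1ne
                  | cons a as => simp at hts ⊢; omega
                have hstep2 : pvParse k (q2 ++ rest) = some rest :=
                  (ih (q2 ++ rest) hlen2 rest).mpr ⟨q2, rfl, hq2'⟩
                rw [hstep1]
                exact hstep2
        · have h2' : PySem.Chars.isIn t.toList ['+', '-', '*', '/'] = false := by
            simpa using h2
          have hred : pvParse (k + 1) (t :: ts) = none := by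
            simp [pvParse, h1', h2']
          rw [hred]
          constructor
          · intro h; simp at h
          · rintro ⟨pre, hp, hc⟩
            cases pre with
            | nil => exact absurd hc pvCat_not_one_nil
            | cons p ps =>
              obtain ⟨rfl, hts'⟩ : t = p ∧ ts = ps ++ rest := by simpa using hp
              rcases (pvCat_cons_inv hc).2 with ⟨ha, _⟩ | ⟨_, hb, _⟩
              · rw [h1'] at ha; exact absurd ha (by simp)
              · rw [h2'] at hb; exact absurd hb (by simp)

-- ===== A-side characterisation =====
theorem pvALoop_eq_runA (toks : List String) : ∀ stack : List String,
    pvALoop stack toks = match pvRunA stack.length toks with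
      | some m => m == 1 | none => false := by
  induction toks with
  | nil => intro stack; simp [pvALoop, pvRunA]
  | cons t ts ih =>
    intro stack
    simp only [pvALoop, pvRunA]
    by_cases h1 : PySem.Chars.strIsalnum t.toList = true
    · simpa [h1] using ih (t :: stack)
    · by_cases h2 : PySem.Chars.isIn t.toList ['+', '-', '*', '/'] = true
      · by_cases h3 : stack.length < 2
        · simp [h1, h2, h3]
        · have := ih ("result" :: stack.drop 2)
          have hlen : ("result" :: stack.drop 2).length = stack.length - 1 := by
            simp; omega
          rw [hlen] at this
          simp [h1, h2, h3, this]
      · simp [h1, h2]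

theorem pvRunA_append (p q : List String) : ∀ k : Nat,
    pvRunA k (p ++ q) = match pvRunA k p with
      | none => none | some m => pvRunA m q := by
  induction p with
  | nil => intro k; simp [pvRunA]
  | cons t ts ih =>
    intro k
    simp only [List.cons_append, pvRunA]
    by_cases h1 : PySem.Chars.strIsalnum t.toList = true
    · simp [h1, ih]
    · by_cases h2 : PySem.Chars.isIn t.toList ['+', '-', '*', '/'] = true
      · by_cases h3 : k < 2
        · simp [h1, h2, h3]
        · simp [h1, h2, h3, ih]
      · simp [h1, h2]

theorem pvRunA_reverse (toks : List String) :
    pvRunA 0 toks.reverse = pvRunAR toks := by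
  induction toks with
  | nil => simp [pvRunA, pvRunAR]
  | cons t ts ih =>
    rw [List.reverse_cons, pvRunA_append, ih]
    cases h : pvRunAR ts with
    | none => simp [pvRunAR, h]
    | some k => simp only [pvRunAR, h, pvRunA]

theorem pvRunAR_cat {toks : List String} : ∀ {k : Nat},
    pvRunAR toks = some k → pvCat k toks := by
  induction toks with
  | nil =>
    intro k h
    simp only [pvRunAR, Option.some.injEq] at h
    subst h; exact pvCat.nil
  | cons t ts ih =>
    intro k h
    cases hr : pvRunAR ts with
    | none => rw [pvRunAR, hr] at h; simp at h
    | some m =>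
      by_cases h1 : PySem.Chars.strIsalnum t.toList = true
      · have hred : pvRunAR (t :: ts) = some (m + 1) := by
          rw [pvRunAR, hr]; simp [h1]
        rw [hred] at h
        have hk : k = m + 1 := by simpa using h.symm
        subst hk
        exact pvCat.operand t m ts h1 (ih hr)
      · by_cases h2 : PySem.Chars.isIn t.toList ['+', '-', '*', '/'] = true
        · by_cases h3 : m < 2
          · have hred : pvRunAR (t :: ts) = none := by
              rw [pvRunAR, hr]; simp [h1, h2, h3]
            rw [hred] at h; simp at h
          · have hred : pvRunAR (t :: ts) = some (m - 1) := by
              rw [pvRunAR, hr]; simp [h1, h2, h3]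
            rw [hred] at h
            have hk : k = m - 1 := by simpa using h.symm
            subst hk
            have h1' : PySem.Chars.strIsalnum t.toList = false := by
              simpa using h1
            have hm : m - 1 - 1 + 2 = m := by omega
            have := pvCat.oper t (m - 1 - 1) ts h1' h2 (by rw [hm]; exact ih hr)
            have he : m - 1 - 1 + 1 = m - 1 := by omega
            rw [he] at this; exact this
        · have hred : pvRunAR (t :: ts) = none := by
            rw [pvRunAR, hr]; simp [h1, h2]
          rw [hred] at h; simp at h

theorem pvCat_runAR {n : Nat} {toks : List String} (h : pvCat n toks) :
    pvRunAR toks = some n := by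
  induction h with
  | nil => simp [pvRunAR]
  | operand t m ts h1 hc ih =>
    rw [pvRunAR, ih]
    simp [h1]
  | oper t m ts h1 h2 hc ih =>
    have h3 : ¬ m + 2 < 2 := by omega
    rw [pvRunAR, ih]
    simp [h1, h2, h3]

-- Both programs decide the same property: pvCat 1 of the token list.
theorem pvA_true_iff (toks : List String) :
    pvALoop [] toks.reverse = true ↔ pvCat 1 toks := by
  rw [pvALoop_eq_runA]
  simp only [List.length_nil, pvRunA_reverse]
  constructor
  · intro h
    cases hr : pvRunAR toks with
    | none => rw [hr] at h; simp at h
    | some k =>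
      rw [hr] at h
      have hk : k = 1 := by simpa using h
      subst hk
      exact pvRunAR_cat hr
  · intro h
    rw [pvCat_runAR h]; rfl

theorem pvB_true_iff (toks : List String) :
    (decide (pvParse toks.length toks = some []) = true) ↔ pvCat 1 toks := by
  rw [decide_eq_true_iff, pvParse_iff toks.length toks le_rfl []]
  constructor
  · rintro ⟨pre, hp, hc⟩
    simpa [hp] using hc
  · intro h
    exact ⟨toks, by simp, h⟩

-- ===== VERDICT (by name: the statement is the Claim_ definition above) =====
theorem is_valid_prefix_spec : Claim_equal_is_valid_prefix := by
  intro expression _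
  unfold Spec_is_valid_prefix is_valid_prefix is_valid_prefix_alt
  have h := (pvA_true_iff ((PySem.Str.split? expression " ").getD [])).trans
    (pvB_true_iff ((PySem.Str.split? expression " ").getD [])).symm
  cases hx : pvALoop [] ((PySem.Str.split? expression " ").getD []).reverse <;>
    cases hy : (decide (pvParse ((PySem.Str.split? expression " ").getD []).length
      ((PySem.Str.split? expression " ").getD []) = some [])) <;>
    simp_all
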